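-- pv_equiv track=rewrite | github.com/IsaakKareithi/CD8-Graphs | C6-HW-CountRabbits.py | minNumberOfRabbits
-- ===== SOURCE A (Python) =====
-- def minNumberOfRabbits(answers, N):
--
-- 	# Initialize map
-- 	Map = {}
--
-- 	# Traverse array and map arr[i]
-- 	# to the number of occurrences
-- 	for a in range(N):
--
-- 		if answers[a] in Map:
-- 			Map[answers[a]] += 1
-- 		else:
-- 			Map[answers[a]] = 1
--
-- 	# Initialize count as 0;
-- 	count = 0
--
-- 	# Find the number groups and
-- 	# no. of rabbits in each group
-- 	for a in Map:
--
-- 		x = a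
-- 		y = Map[a]
--
-- 		# Find number of groups and
-- 		# multiply them with number
-- 		# of rabbits in each group
-- 		if (y % (x + 1) == 0):
-- 			count = count + (y // (x + 1)) * (x + 1)
-- 		else:
-- 			count = count + ((y // (x + 1)) + 1) * (x + 1)
--
-- 	# count gives minimum number
-- 	# of rabbits in the forest
-- 	return count
-- ===== SOURCE B (Python) =====
-- def minNumberOfRabbits(answers, N):
--     # Sort the first N answers, then scan maximal runs of equal values:
--     # a run of y rabbits answering x needs ceil(y/(x+1)) groups of size x+1.
--     vals = sorted(answers[i] for i in range(N))
--     total = 0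
--     i = 0
--     n = len(vals)
--     while i < n:
--         x = vals[i]
--         j = i + 1
--         while j < n and vals[j] == x:
--             j += 1
--         y = j - i
--         if y % (x + 1) == 0:
--             total += (y // (x + 1)) * (x + 1)
--         else:
--             total += (y // (x + 1) + 1) * (x + 1)
--         i = j
--     return total
-- ===== Notes on version B (the rewrite author's own statement) =====
-- stated objective: alternative
-- what changed: Replaced the dict frequency table plus a second pass over the dict with a sort of the first N answers followed by a single scan that groups maximal runs of equal values.
import Mathlib
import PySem

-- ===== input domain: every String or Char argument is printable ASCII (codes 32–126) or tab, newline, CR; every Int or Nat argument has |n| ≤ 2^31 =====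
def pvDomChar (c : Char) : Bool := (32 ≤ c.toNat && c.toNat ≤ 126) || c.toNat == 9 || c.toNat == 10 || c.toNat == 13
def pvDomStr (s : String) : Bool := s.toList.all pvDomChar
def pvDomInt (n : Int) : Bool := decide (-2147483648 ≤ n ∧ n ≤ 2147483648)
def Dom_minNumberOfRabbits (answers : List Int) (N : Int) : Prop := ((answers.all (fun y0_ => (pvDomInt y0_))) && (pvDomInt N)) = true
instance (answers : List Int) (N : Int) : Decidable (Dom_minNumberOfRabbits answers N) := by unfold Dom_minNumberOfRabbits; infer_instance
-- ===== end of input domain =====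

-- B replaces A's dict frequency table + dict pass with sort-then-group-runs over the first N answers (alternative decomposition, same results).


-- ===== PORT A =====
def minNumberOfRabbits (answers : List Int) (N : Int) : Int :=
  -- for a in range(N): build the frequency map (answers[a] via pyGetD; Pre_ keeps the index in range)
  let m : PySem.Dict Int Int :=
    (PySem.List.pyRange 0 N 1).foldl
      (fun (d : PySem.Dict Int Int) a =>
        let k := PySem.List.pyGetD answers a 0
        if d.contains k then d.insert k (d.getD k 0 + 1) else d.insert k 1)
      PySem.Dict.empty
  -- for a in Map: accumulate the group counts (x+1 ≠ 0 guaranteed by Pre_)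
  m.keys.foldl
    (fun count a =>
      let x := a
      let y := m.getD a 0
      if PySem.Int.mod y (x + 1) = 0 then
        count + PySem.Int.floordiv y (x + 1) * (x + 1)
      else
        count + (PySem.Int.floordiv y (x + 1) + 1) * (x + 1))
    0

-- ===== PORT B =====
-- the run-grouping scan of Source B: take the leading run of equal values, add its group count, recurse on the remainder
def pvRunSum : List Int → Int
  | [] => 0
  | x :: rest =>
    let y : Int := 1 + (rest.takeWhile (fun v => v == x)).length
    (if PySem.Int.mod y (x + 1) = 0 then PySem.Int.floordiv y (x + 1) * (x + 1)
     else (PySem.Int.floordiv y (x + 1) + 1) * (x + 1))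
      + pvRunSum (rest.dropWhile (fun v => v == x))
termination_by l => l.length
decreasing_by
  exact Nat.lt_succ_of_le (List.length_dropWhile_le _ _)

def minNumberOfRabbits_alt (answers : List Int) (N : Int) : Int :=
  pvRunSum (PySem.List.sorted
    ((PySem.List.pyRange 0 N 1).map (fun i => PySem.List.pyGetD answers i 0))
    (fun v => v) false)

-- ===== PRECONDITION & SPEC =====
-- Pre_ excludes exactly A's exceptions: IndexError when N > len(answers), ZeroDivisionError when -1 occurs among the first N answers.
def Pre_minNumberOfRabbits (answers : List Int) (N : Int) : Prop :=
  N ≤ (answers.length : Int) ∧ (-1 : Int) ∉ answers.take N.toNat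
instance (answers : List Int) (N : Int) : Decidable (Pre_minNumberOfRabbits answers N) := by
  unfold Pre_minNumberOfRabbits; infer_instance
def pvWitness_minNumberOfRabbits : List Int × Int := ([1, 1, 2], 3)

def Spec_minNumberOfRabbits (answers : List Int) (N : Int) (out : Int) : Prop := out = minNumberOfRabbits_alt answers N
instance (answers : List Int) (N : Int) (out : Int) : Decidable (Spec_minNumberOfRabbits answers N out) := by unfold Spec_minNumberOfRabbits; infer_instance

-- ===== CLAIM (what is proved, stated in full; the proofs are below) =====
def Claim_equal_minNumberOfRabbits : Prop := ∀ (answers : List Int) (N : Int), Dom_minNumberOfRabbits answers N → Pre_minNumberOfRabbits answers N → Spec_minNumberOfRabbits answers N (minNumberOfRabbits answers N)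

-- ===== LEMMAS AND PROOFS =====

-- per-value contribution: the group count for one answer value x held by y rabbits
def pvContrib (x y : Int) : Int :=
  if PySem.Int.mod y (x + 1) = 0 then PySem.Int.floordiv y (x + 1) * (x + 1)
  else (PySem.Int.floordiv y (x + 1) + 1) * (x + 1)

-- the first-N prefix read by both ports is answers.take N.toNat
theorem pv_prefix_eq (answers : List Int) (N : Int) (hN : N ≤ (answers.length : Int)) :
    (PySem.List.pyRange 0 N 1).map (fun i => PySem.List.pyGetD answers i 0)
      = answers.take N.toNat := by
  rcases le_or_gt N 0 with h | h
  · rw [PySem.List.pyRange_one_eq_nil h]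
    simp [Int.toNat_of_nonpos h]
  · rw [PySem.List.pyRange_one 0 N, List.map_map]
    have hlen : N.toNat ≤ answers.length := by omega
    apply List.ext_getElem
    · simp [hlen]
    · intro i h1 h2
      have hi : i < N.toNat := by simpa using h1
      have hi' : i < answers.length := lt_of_lt_of_le hi hlen
      simp [List.getElem_take, PySem.List.pyGetD_natCast, List.getD_eq_getElem?_getD,
        List.getElem?_eq_getElem hi']

-- the sorted run-grouping scan sums pvContrib over any duplicate-free enumeration D of the values
theorem pv_runSum_eq_sum (s : List Int) (hs : s.Pairwise (· ≤ ·)) (D : List Int)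
    (hnd : D.Nodup) (hmem : ∀ k, k ∈ D ↔ k ∈ s) :
    pvRunSum s = (D.map (fun k => pvContrib k (s.count k))).sum := by
  induction s using pvRunSum.induct generalizing D with
  | case1 =>
    have : D = [] := by
      apply List.eq_nil_iff_forall_not_mem.mpr
      intro k hk; simpa using (hmem k).mp hk
    simp [this, pvRunSum]
  | case2 x rest ih =>
    set run := rest.takeWhile (fun v => v == x) with hrun
    set tail := rest.dropWhile (fun v => v == x) with htail
    have hsplit : rest = run ++ tail := (List.takeWhile_append_dropWhile).symm
    have hrunx : ∀ e ∈ run, e = x := by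
      intro e he
      have := List.mem_takeWhile_imp he
      simpa using this
    have hxrest : ∀ e ∈ rest, x ≤ e := (List.pairwise_cons.mp hs).1
    have hrest : rest.Pairwise (· ≤ ·) := (List.pairwise_cons.mp hs).2
    have htp : tail.Pairwise (· ≤ ·) := hrest.sublist (List.dropWhile_sublist _)
    have hxtail : ∀ e ∈ tail, x < e := by
      cases h : tail with
      | nil => simp
      | cons hd tl =>
        have hhd : ¬ (hd == x) = true := by
          have := List.head?_dropWhile_not (fun v => (v == x)) rest
          rw [← htail, h] at this; simpa using this
        have hhdne : hd ≠ x := by simpa using hhd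
        have hsub : tail ⊆ rest := by rw [htail]; exact (List.dropWhile_sublist _).subset
        have hhdmem : hd ∈ rest := hsub (by simp [h])
        have hxhd : x < hd := lt_of_le_of_ne (hxrest hd hhdmem) (Ne.symm hhdne)
        intro e he
        have he' : e ∈ hd :: tl := h ▸ he
        rcases List.mem_cons.mp he' with rfl | he''
        · exact hxhd
        · have hle : hd ≤ e := (List.pairwise_cons.mp (h ▸ htp)).1 e he''
          exact lt_of_lt_of_le hxhd hle
    have hxnot : x ∉ tail := fun hmem' => lt_irrefl x (hxtail x hmem')
    have hcountx : (x :: rest).count x = 1 + run.length := by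
      rw [hsplit, List.count_cons_self, List.count_append,
        List.count_eq_length.mpr (fun e he => (hrunx e he).symm),
        List.count_eq_zero.mpr hxnot]
      omega
    have hxD : x ∈ D := (hmem x).mpr (by simp)
    have hperm : D.Perm (x :: D.erase x) := List.perm_cons_erase hxD
    have hndE : (D.erase x).Nodup := hnd.erase x
    have hmemE : ∀ k, k ∈ D.erase x ↔ k ∈ tail := by
      intro k
      rw [List.Nodup.mem_erase_iff hnd]
      constructor
      · rintro ⟨hne, hkD⟩
        have : k ∈ x :: rest := (hmem k).mp hkD
        rcases List.mem_cons.mp this with rfl | hkrest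
        · exact absurd rfl hne
        · rw [hsplit] at hkrest
          rcases List.mem_append.mp hkrest with hkr | hkt
          · exact absurd (hrunx k hkr) hne
          · exact hkt
      · intro hkt
        have hne : k ≠ x := fun h => hxnot (h ▸ hkt)
        refine ⟨hne, (hmem k).mpr ?_⟩
        rw [List.mem_cons, hsplit, List.mem_append]
        exact Or.inr (Or.inr hkt)
    have hcount : ∀ k ∈ D.erase x, (x :: rest).count k = tail.count k := by
      intro k hk
      have hkt : k ∈ tail := (hmemE k).mp hk
      have hne : k ≠ x := fun h => hxnot (h ▸ hkt)
      have hnr : k ∉ run := fun hkr => hne (hrunx k hkr)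
      rw [hsplit]
      simp [List.count_append, List.count_eq_zero.mpr hnr, Ne.symm hne]
    have hib := ih htp (D.erase x) hndE hmemE
    have hsum : (D.map (fun k => pvContrib k ((x :: rest).count k : Int))).sum
        = pvContrib x (((x :: rest).count x : Int))
          + ((D.erase x).map (fun k => pvContrib k (tail.count k : Int))).sum := by
      rw [List.Perm.sum_eq (hperm.map _), List.map_cons, List.sum_cons]
      congr 1
      exact congrArg List.sum (List.map_congr_left (fun k hk => by rw [hcount k hk]))
    have hcx : (((x :: rest).count x : Int)) = 1 + (run.length : Int) := by
      rw [hcountx]; push_cast; ring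
    rw [hsum, hcx, ← hib, pvRunSum]
    simp only [pvContrib, ← hrun, ← htail]

-- ===== VERDICT (by name: the statement is the Claim_ definition above) =====
theorem minNumberOfRabbits_spec : Claim_equal_minNumberOfRabbits := by
  intro answers N _hD hPre
  obtain ⟨hN, _hno⟩ := hPre
  unfold Spec_minNumberOfRabbits
  set L := answers.take N.toNat with hL
  have hpre : (PySem.List.pyRange 0 N 1).map (fun i => PySem.List.pyGetD answers i 0) = L :=
    pv_prefix_eq answers N hN
  -- A's dict is counter L
  have hdict :
      (PySem.List.pyRange 0 N 1).foldl
        (fun (d : PySem.Dict Int Int) a =>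
          let k := PySem.List.pyGetD answers a 0
          if d.contains k then d.insert k (d.getD k 0 + 1) else d.insert k 1)
        PySem.Dict.empty = PySem.Dict.counter L := by
    have hstep : (fun (d : PySem.Dict Int Int) k =>
        if d.contains k then d.insert k (d.getD k 0 + 1) else d.insert k 1)
        = (fun (d : PySem.Dict Int Int) k => d.insert k (d.getD k 0 + 1)) := by
      funext d k
      by_cases hc : d.contains k
      · simp [hc]
      · rw [if_neg (by simp [hc]), PySem.Dict.getD_of_not_contains d 0 (by simpa using hc)]; norm_num
    rw [← PySem.Dict.foldl_insert_getD_add_one_eq_counter, ← hstep, ← hpre, List.foldl_map]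
  -- A's value is the dedup-indexed sum of contributions
  have hA : minNumberOfRabbits answers N
      = ((PySem.List.dedup L).map (fun k => pvContrib k ((L.count k : Int)))).sum := by
    show ((PySem.List.pyRange 0 N 1).foldl
        (fun (d : PySem.Dict Int Int) a =>
          let k := PySem.List.pyGetD answers a 0
          if d.contains k then d.insert k (d.getD k 0 + 1) else d.insert k 1)
        PySem.Dict.empty).keys.foldl _ 0 = _
    rw [hdict]
    have hkeys : (PySem.Dict.counter L).keys = PySem.List.dedup L := by
      rw [PySem.Dict.keys_counter, ← PySem.List.dedup_eq_ofList]
    rw [hkeys]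
    have hbody : (fun (count : Int) (a : Int) =>
        let x := a
        let y := (PySem.Dict.counter L).getD a 0
        if PySem.Int.mod y (x + 1) = 0 then
          count + PySem.Int.floordiv y (x + 1) * (x + 1)
        else
          count + (PySem.Int.floordiv y (x + 1) + 1) * (x + 1))
        = (fun (count : Int) (a : Int) => count + pvContrib a ((L.count a : Int))) := by
      funext c a
      simp only [PySem.Dict.getD_counter, pvContrib]
      by_cases hcnd : PySem.Int.mod ((L.count a : Int)) (a + 1) = 0 <;> simp [hcnd]
    rw [hbody, PySem.List.foldl_add, zero_add]
  -- B's value is the same sum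
  have hB : minNumberOfRabbits_alt answers N
      = ((PySem.List.dedup L).map (fun k => pvContrib k ((L.count k : Int)))).sum := by
    unfold minNumberOfRabbits_alt
    rw [hpre]
    have hsorted : (PySem.List.sorted L (fun v : Int => v) false).Pairwise (· ≤ ·) :=
      PySem.List.sorted_pairwise L (fun v : Int => v)
    have hperm : (PySem.List.sorted L (fun v : Int => v) false).Perm L :=
      PySem.List.sorted_perm L (fun v : Int => v) false
    rw [pv_runSum_eq_sum _ hsorted (PySem.List.dedup L) (PySem.List.nodup_dedup L)
      (fun k => (PySem.List.mem_dedup L k).trans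
        (PySem.List.mem_sorted L (fun v : Int => v) false k).symm)]
    apply congrArg
    apply List.map_congr_left
    intro k _
    rw [hperm.count_eq]
  rw [hA, hB]
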